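-- pv_equiv track=rewrite | github.com/codeathon/sanskrit-chatbot | src/server/server.py | sanitize_messages_for_anthropic
-- ===== SOURCE A (Python) =====
-- def sanitize_messages_for_anthropic(history, final_user_content):
--     """
--     Anthropic returns 400 for empty content, invalid roles, or non-alternating turns.
--     Merge consecutive same-role turns; drop empties; ensure the sequence starts with user.
--     """
--     raw = []
--     for h in history[-12:]:
--         if not isinstance(h, dict):
--             continue
--         role = h.get('role')
--         if role not in ('user', 'assistant'):
--             continue
--         c = h.get('content', '')
--         if not isinstance(c, str):
--             c = '' if c is None else str(c)
--         c = c.strip()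
--         if not c:
--             continue
--         raw.append({'role': role, 'content': c})
--     merged = []
--     for m in raw:
--         if merged and merged[-1]['role'] == m['role']:
--             merged[-1]['content'] += '\n\n' + m['content']
--         else:
--             merged.append(dict(m))
--     while merged and merged[0]['role'] != 'user':
--         merged.pop(0)
--     # Drop trailing user turns (e.g. failed prior request with no assistant reply, or
--     # duplicate user): the RAG prompt is the single authoritative user message for this call.
--     while merged and merged[-1]['role'] == 'user':
--         merged.pop()
--     merged.append({'role': 'user', 'content': final_user_content})
--     return merged
-- ===== SOURCE B (Python) =====
-- def _clean(h):
--     if not isinstance(h, dict):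
--         return None
--     role = h.get('role')
--     if role not in ('user', 'assistant'):
--         return None
--     c = h.get('content', '')
--     if not isinstance(c, str):
--         c = '' if c is None else str(c)
--     c = c.strip()
--     return (role, c) if c else None
--
--
-- def _merge(turns):
--     # right recursion: merge the tail first, then fold the head into it
--     if not turns:
--         return []
--     role, c = turns[0]
--     rest = _merge(turns[1:])
--     if rest and rest[0][0] == role:
--         return [(role, c + '\n\n' + rest[0][1])] + rest[1:]
--     return [(role, c)] + rest
--
--
-- def _dropwhile(pred, ts):
--     if ts and pred(ts[0]):
--         return _dropwhile(pred, ts[1:])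
--     return ts
--
--
-- def sanitize_messages_for_anthropic(history, final_user_content):
--     turns = [t for t in map(_clean, history[-12:]) if t is not None]
--     merged = _merge(turns)
--     merged = _dropwhile(lambda t: t[0] != 'user', merged)
--     merged = list(reversed(_dropwhile(lambda t: t[0] == 'user', list(reversed(merged)))))
--     return [{'role': r, 'content': c} for r, c in merged] \
--         + [{'role': 'user', 'content': final_user_content}]
-- ===== Notes on version B (the rewrite author's own statement) =====
-- stated objective: alternative
-- what changed: Replaced A's two append-at-end passes (build a raw dict list, then left-fold merge) and two while-pop trims with a filterMap-style clean over (role, content) tuples, a right-recursive merge that folds each head into the already-merged tail, and generic recursive dropwhile trims (the trailing trim via reverse), building the output dicts once at the end.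
import Mathlib
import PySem

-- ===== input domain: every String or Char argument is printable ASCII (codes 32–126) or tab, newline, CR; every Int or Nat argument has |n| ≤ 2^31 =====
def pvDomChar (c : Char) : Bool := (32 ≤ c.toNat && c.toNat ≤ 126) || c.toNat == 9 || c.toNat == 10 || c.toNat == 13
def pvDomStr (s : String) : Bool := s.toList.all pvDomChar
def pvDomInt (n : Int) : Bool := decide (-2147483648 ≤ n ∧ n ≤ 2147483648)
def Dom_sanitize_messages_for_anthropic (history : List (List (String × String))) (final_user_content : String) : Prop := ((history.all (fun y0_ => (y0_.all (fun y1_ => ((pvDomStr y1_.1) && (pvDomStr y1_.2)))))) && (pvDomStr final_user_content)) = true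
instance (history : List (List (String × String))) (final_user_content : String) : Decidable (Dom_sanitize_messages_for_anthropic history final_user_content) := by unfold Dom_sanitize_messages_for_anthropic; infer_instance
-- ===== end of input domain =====

-- B replaces A's two append-at-end passes and while-pop trims by a clean/filterMap stage over
-- (role, content) tuples, a right-recursive merge, and recursive dropwhile trims (objective:
-- alternative decomposition, same cost).

-- dict.get(k): first-match lookup in the association list (shared primitive of both ports)
def pvDictGet? (d : List (String × String)) (k : String) : Option String :=
  (d.find? (fun kv => kv.1 == k)).map (·.2)

-- ===== PORT A =====
-- while merged and merged[0]['role'] != 'user': merged.pop(0)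
-- (keys are always present in the dicts this runs on, so .getD "" is exact there)
def aTrimFront : List (List (String × String)) → List (List (String × String))
  | [] => []
  | d :: rest =>
    if ((pvDictGet? d "role").getD "") != "user" then aTrimFront rest else d :: rest

-- while merged and merged[-1]['role'] == 'user': merged.pop()
def aTrimBack (l : List (List (String × String))) : List (List (String × String)) :=
  match h : l.getLast? with
  | none => l
  | some d =>
    if ((pvDictGet? d "role").getD "") == "user" then aTrimBack l.dropLast else l
termination_by l.length
decreasing_by
  have hne : l ≠ [] := by intro e; subst e; simp at h
  cases l with
  | nil => exact absurd rfl hne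
  | cons a t => simp [List.length_dropLast]

def sanitize_messages_for_anthropic (history : List (List (String × String))) (final_user_content : String) : List (List (String × String)) :=
  -- isinstance(h, dict) and isinstance(c, str) always hold under the type convention,
  -- so those guards (and the None/str coercion) are identically true/skipped here.
  let raw := (PySem.List.slice history (some (-12)) none).foldl (fun raw h =>
    match pvDictGet? h "role" with
    | some role =>
      if role == "user" || role == "assistant" then
        let c := PySem.Str.strip ((pvDictGet? h "content").getD "")
        if c == "" then raw
        else raw ++ [[("role", role), ("content", c)]]
      else raw
    | none => raw) []
  let merged := raw.foldl (fun merged m =>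
    match merged.getLast? with
    | some last =>
      if pvDictGet? last "role" == pvDictGet? m "role" then
        -- merged[-1]['content'] += '\n\n' + m['content']  (the keys are always present in raw items)
        merged.dropLast ++ [last.map (fun kv =>
          if kv.1 == "content" then (kv.1, kv.2 ++ ("\n\n" ++ ((pvDictGet? m "content").getD ""))) else kv)]
      else merged ++ [m]
    | none => merged ++ [m]) []
  aTrimBack (aTrimFront merged) ++ [[("role", "user"), ("content", final_user_content)]]

-- ===== PORT B =====
-- _clean(h): None for a bad role or empty stripped content, else the (role, content) tuple
-- (the isinstance/None/str branches are vacuous under the type convention)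
def bClean (h : List (String × String)) : Option (String × String) :=
  match pvDictGet? h "role" with
  | some role =>
    if role == "user" || role == "assistant" then
      let c := PySem.Str.strip ((pvDictGet? h "content").getD "")
      if c == "" then none else some (role, c)
    else none
  | none => none

-- _merge(turns): right recursion, folding the head into the merged tail
def bMerge : List (String × String) → List (String × String)
  | [] => []
  | p :: ts =>
    match bMerge ts with
    | q :: qs => if q.1 == p.1 then (p.1, p.2 ++ ("\n\n" ++ q.2)) :: qs else p :: q :: qs
    | [] => [p]

-- _dropwhile(pred, ts)
def bDropwhile (pred : (String × String) → Bool) : List (String × String) → List (String × String)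
  | [] => []
  | p :: ts => if pred p then bDropwhile pred ts else p :: ts

def sanitize_messages_for_anthropic_alt (history : List (List (String × String))) (final_user_content : String) : List (List (String × String)) :=
  let turns := (PySem.List.slice history (some (-12)) none).filterMap bClean
  let m1 := bMerge turns
  let m2 := bDropwhile (fun t => t.1 != "user") m1
  let m3 := (bDropwhile (fun t => t.1 == "user") m2.reverse).reverse
  m3.map (fun p => [("role", p.1), ("content", p.2)])
    ++ [[("role", "user"), ("content", final_user_content)]]

-- ===== PRECONDITION & SPEC =====
def Spec_sanitize_messages_for_anthropic (history : List (List (String × String))) (final_user_content : String) (out : List (List (String × String))) : Prop := out = sanitize_messages_for_anthropic_alt history final_user_content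
instance (history : List (List (String × String))) (final_user_content : String) (out : List (List (String × String))) : Decidable (Spec_sanitize_messages_for_anthropic history final_user_content out) := by unfold Spec_sanitize_messages_for_anthropic; infer_instance

-- ===== CLAIM (what is proved, stated in full; the proofs are below) =====
def Claim_equal_sanitize_messages_for_anthropic : Prop := ∀ (history : List (List (String × String))) (final_user_content : String), Dom_sanitize_messages_for_anthropic history final_user_content → Spec_sanitize_messages_for_anthropic history final_user_content (sanitize_messages_for_anthropic history final_user_content)

-- ===== LEMMAS AND PROOFS =====

-- the canonical dict a kept turn becomes
def toD (p : String × String) : List (String × String) := [("role", p.1), ("content", p.2)]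

-- A's merge step and B's merge step, factored for the proofs
def mergeL (turns : List (String × String)) (p : String × String) : List (String × String) :=
  match turns.getLast? with
  | some last =>
    if last.1 == p.1 then turns.dropLast ++ [(p.1, last.2 ++ ("\n\n" ++ p.2))]
    else turns ++ [p]
  | none => turns ++ [p]

def bStep (p : String × String) (rest : List (String × String)) : List (String × String) :=
  match rest with
  | q :: qs => if q.1 == p.1 then (p.1, p.2 ++ ("\n\n" ++ q.2)) :: qs else p :: q :: qs
  | [] => [p]

theorem lookup_toD_role (p : String × String) : pvDictGet? (toD p) "role" = some p.1 := by
  simp [pvDictGet?, toD, List.find?]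

theorem lookup_toD_content (p : String × String) : pvDictGet? (toD p) "content" = some p.2 := by
  simp [pvDictGet?, toD, List.find?]

theorem stepA_filter_eq (raw : List (List (String × String))) (h : List (String × String)) :
    (match pvDictGet? h "role" with
    | some role =>
      if role == "user" || role == "assistant" then
        let c := PySem.Str.strip ((pvDictGet? h "content").getD "")
        if c == "" then raw
        else raw ++ [[("role", role), ("content", c)]]
      else raw
    | none => raw) = raw ++ ((bClean h).map toD).toList := by
  unfold bClean
  cases pvDictGet? h "role" with
  | none => simp
  | some role =>
    by_cases hr : (role == "user" || role == "assistant") = true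
    · simp only [hr, if_true]; split <;> simp [toD]
    · simp [hr]

theorem flatMap_toD (l : List (List (String × String))) :
    l.flatMap (fun h => ((bClean h).map toD).toList) = (l.filterMap bClean).map toD := by
  induction l with
  | nil => rfl
  | cons h t ih =>
    rw [List.flatMap_cons, List.filterMap_cons]
    cases bClean h <;> simp [ih]

-- A's merge step, on canonical dicts, is mergeL through toD
theorem mergeStep_map (T : List (String × String)) (p : String × String) :
    (match (T.map toD).getLast? with
    | some last =>
      if pvDictGet? last "role" == pvDictGet? (toD p) "role" then
        (T.map toD).dropLast ++ [last.map (fun kv =>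
          if kv.1 == "content" then (kv.1, kv.2 ++ ("\n\n" ++ ((pvDictGet? (toD p) "content").getD ""))) else kv)]
      else (T.map toD) ++ [toD p]
    | none => (T.map toD) ++ [toD p]) = (mergeL T p).map toD := by
  unfold mergeL
  rw [List.getLast?_map]
  cases hT : T.getLast? with
  | none => simp [toD]
  | some last =>
    simp only [Option.map_some, lookup_toD_role, lookup_toD_content]
    by_cases he : (last.1 == p.1) = true
    · have : last.1 = p.1 := by simpa using he
      simp [he, lookup_toD_role, toD, this, List.map_dropLast]
    · simp [he, lookup_toD_role, toD]

-- A's merge fold, through toD, is the tuple-level left fold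
theorem mergeFoldl_map (ts : List (String × String)) :
    ∀ T : List (String × String),
    (ts.map toD).foldl (fun merged m =>
      match merged.getLast? with
      | some last =>
        if pvDictGet? last "role" == pvDictGet? m "role" then
          merged.dropLast ++ [last.map (fun kv =>
            if kv.1 == "content" then (kv.1, kv.2 ++ ("\n\n" ++ ((pvDictGet? m "content").getD ""))) else kv)]
        else merged ++ [m]
      | none => merged ++ [m]) (T.map toD)
    = (ts.foldl mergeL T).map toD := by
  induction ts with
  | nil => intro T; rfl
  | cons p t ih =>
    intro T
    simp only [List.map_cons, List.foldl_cons]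
    rw [mergeStep_map]
    exact ih (mergeL T p)

theorem bMerge_cons (p : String × String) (ts : List (String × String)) :
    bMerge (p :: ts) = bStep p (bMerge ts) := by
  simp [bMerge, bStep]

theorem mergeL_cons2 (x y : String × String) (ys : List (String × String)) (p : String × String) :
    mergeL (x :: y :: ys) p = x :: mergeL (y :: ys) p := by
  unfold mergeL
  rw [List.getLast?_cons_cons]
  cases h : (y :: ys).getLast? with
  | none => simp at h
  | some last =>
    simp only [h]
    split <;> simp

-- the key commuting lemma: folding a new head in commutes with merging a new last element
theorem bStep_mergeL_comm (R : List (String × String)) (q p : String × String) :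
    bStep q (mergeL R p) = mergeL (bStep q R) p := by
  match R with
  | [] =>
    simp only [mergeL, bStep, List.getLast?_nil, List.nil_append, List.getLast?_singleton]
    by_cases h : (p.1 == q.1) = true
    · have h' : p.1 = q.1 := by simpa using h
      simp [h, h', List.dropLast]
    · have h' : (q.1 == p.1) = false := by
        simp only [beq_eq_false_iff_ne]; intro e; exact absurd (by simp [e]) h
      simp [h, h', List.dropLast]
  | [r] =>
    simp only [mergeL, List.getLast?_singleton, List.dropLast_singleton, List.nil_append]
    by_cases h1 : (r.1 == p.1) = true
    · have hr : r.1 = p.1 := by simpa using h1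
      simp only [h1, if_true, bStep]
      by_cases h2 : (p.1 == q.1) = true
      · have hp : p.1 = q.1 := by simpa using h2
        have h3 : (r.1 == q.1) = true := by simp [hr, hp]
        simp [h2, h3, mergeL, hp, hr, List.dropLast, String.append_assoc]
      · have h3 : (r.1 == q.1) = false := by
          simp only [beq_eq_false_iff_ne]; intro e
          exact absurd (by simp [← hr, e]) h2
        simp [h2, h3, mergeL, h1, List.dropLast]
    · simp only [h1, if_false, bStep]
      by_cases h3 : (r.1 == q.1) = true
      · have hq : r.1 = q.1 := by simpa using h3
        have h4 : (q.1 == p.1) = false := by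
          simp only [beq_eq_false_iff_ne]; intro e
          exact absurd (by simp [hq, e]) h1
        simp [h3, mergeL, h4, List.dropLast]
      · simp [h3, mergeL, h1, List.dropLast]
  | r :: r2 :: rs =>
    rw [mergeL_cons2]
    simp only [bStep]
    split
    · rw [mergeL_cons2]
    · rw [mergeL_cons2, mergeL_cons2]

theorem bMerge_append_last (ts : List (String × String)) (p : String × String) :
    bMerge (ts ++ [p]) = mergeL (bMerge ts) p := by
  induction ts with
  | nil => simp [bMerge, mergeL]
  | cons q t ih =>
    rw [List.cons_append, bMerge_cons, ih, bMerge_cons, bStep_mergeL_comm]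

theorem foldl_mergeL_eq_bMerge (ts : List (String × String)) :
    ts.foldl mergeL [] = bMerge ts := by
  induction ts using List.reverseRecOn with
  | nil => rfl
  | append_singleton t p ih => rw [List.foldl_append, List.foldl_cons, List.foldl_nil, ih,
      bMerge_append_last]

theorem trimFront_map (T : List (String × String)) :
    aTrimFront (T.map toD) = (bDropwhile (fun t => t.1 != "user") T).map toD := by
  induction T with
  | nil => rfl
  | cons p t ih =>
    simp only [List.map_cons, aTrimFront, bDropwhile, lookup_toD_role, Option.getD_some]
    split <;> simp_all

theorem aTrimBack_concat (l : List (List (String × String))) (d : List (String × String)) :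
    aTrimBack (l ++ [d]) =
      if (((pvDictGet? d "role").getD "") == "user") = true then aTrimBack l else l ++ [d] := by
  have hl : (l ++ [d]).getLast? = some d := by simp
  rw [aTrimBack.eq_def]
  split
  · simp_all
  · next d' heq =>
      rw [hl] at heq
      injection heq with e
      subst e
      rw [List.dropLast_concat]

theorem trimBack_map (T : List (String × String)) :
    aTrimBack (T.map toD) = ((bDropwhile (fun t => t.1 == "user") T.reverse).reverse).map toD := by
  induction T using List.reverseRecOn with
  | nil => simp [aTrimBack, bDropwhile]
  | append_singleton t p ih =>
    simp only [List.map_append, List.map_cons, List.map_nil]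
    rw [aTrimBack_concat]
    simp only [lookup_toD_role, Option.getD_some, List.reverse_append, List.reverse_cons,
      List.reverse_nil, List.nil_append, List.cons_append, bDropwhile]
    split
    · exact ih
    · simp

-- ===== VERDICT (by name: the statement is the Claim_ definition above) =====
theorem sanitize_messages_for_anthropic_spec : Claim_equal_sanitize_messages_for_anthropic := by
  intro history final_user_content _
  unfold Spec_sanitize_messages_for_anthropic
  unfold sanitize_messages_for_anthropic sanitize_messages_for_anthropic_alt
  simp only []
  have hraw : ((PySem.List.slice history (some (-12)) none).foldl (fun raw h =>
      match pvDictGet? h "role" with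
      | some role =>
        if role == "user" || role == "assistant" then
          let c := PySem.Str.strip ((pvDictGet? h "content").getD "")
          if c == "" then raw
          else raw ++ [[("role", role), ("content", c)]]
        else raw
      | none => raw) []) =
      ((PySem.List.slice history (some (-12)) none).filterMap bClean).map toD := by
    rw [PySem.List.foldl_congr_mem _ _ (fun acc h => acc ++ ((bClean h).map toD).toList) _
      (fun acc x _ => stepA_filter_eq acc x)]
    rw [← flatMap_toD]
    simpa using PySem.List.foldl_append_eq_flatMap
      (g := fun h => ((bClean h).map toD).toList)
      (l := PySem.List.slice history (some (-12)) none) (acc := ([] : List (List (String × String))))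
  rw [hraw]
  have hmerge := mergeFoldl_map ((PySem.List.slice history (some (-12)) none).filterMap bClean) []
  simp only [List.map_nil] at hmerge
  rw [hmerge, foldl_mergeL_eq_bMerge, trimFront_map, trimBack_map]
  simp [toD]
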